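-- pv_equiv track=rewrite | github.com/Sinstrus/compbio-projects | dna_engineer_agent/scripts/tools/silent_sites.py | find_protein_in_dna
-- ===== SOURCE A (Python) =====
-- from typing import List, Tuple, Dict, Optional
--
-- CODON_TABLE = {
--     'TTT': 'F', 'TTC': 'F', 'TTA': 'L', 'TTG': 'L',
--     'TCT': 'S', 'TCC': 'S', 'TCA': 'S', 'TCG': 'S',
--     'TAT': 'Y', 'TAC': 'Y', 'TAA': '*', 'TAG': '*',
--     'TGT': 'C', 'TGC': 'C', 'TGA': '*', 'TGG': 'W',
--     'CTT': 'L', 'CTC': 'L', 'CTA': 'L', 'CTG': 'L',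
--     'CCT': 'P', 'CCC': 'P', 'CCA': 'P', 'CCG': 'P',
--     'CAT': 'H', 'CAC': 'H', 'CAA': 'Q', 'CAG': 'Q',
--     'CGT': 'R', 'CGC': 'R', 'CGA': 'R', 'CGG': 'R',
--     'ATT': 'I', 'ATC': 'I', 'ATA': 'I', 'ATG': 'M',
--     'ACT': 'T', 'ACC': 'T', 'ACA': 'T', 'ACG': 'T',
--     'AAT': 'N', 'AAC': 'N', 'AAA': 'K', 'AAG': 'K',
--     'AGT': 'S', 'AGC': 'S', 'AGA': 'R', 'AGG': 'R',
--     'GTT': 'V', 'GTC': 'V', 'GTA': 'V', 'GTG': 'V',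
--     'GCT': 'A', 'GCC': 'A', 'GCA': 'A', 'GCG': 'A',
--     'GAT': 'D', 'GAC': 'D', 'GAA': 'E', 'GAG': 'E',
--     'GGT': 'G', 'GGC': 'G', 'GGA': 'G', 'GGG': 'G'
-- }
--
-- def translate(dna_seq: str, frame: int = 0, stop_at_terminator: bool = True) -> str:
--     """
--     Translate DNA sequence to protein
--
--     Args:
--         dna_seq: DNA sequence string
--         frame: Reading frame offset (0, 1, or 2)
--         stop_at_terminator: If True, stop at first stop codon. If False, continue through stop codons (represented as '*')
--
--     Returns:
--         Protein sequence (single letter codes)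
--     """
--     dna_seq = dna_seq.upper()[frame:]
--     protein = []
--
--     for i in range(0, len(dna_seq) - 2, 3):
--         codon = dna_seq[i:i+3]
--         if len(codon) == 3:
--             aa = CODON_TABLE.get(codon, 'X')  # X for unknown
--             if aa == '*' and stop_at_terminator:  # Stop codon
--                 break
--             protein.append(aa)
--
--     return ''.join(protein)
--
-- def find_protein_in_dna(dna_seq: str, protein_seq: str) -> Optional[Tuple[int, int, int]]:
--     """
--     Find protein sequence within DNA by trying all reading frames
--
--     Args:
--         dna_seq: DNA sequence
--         protein_seq: Target protein sequence
--
--     Returns: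
--         Tuple of (start_pos, end_pos, frame) or None if not found
--     """
--     protein_seq = protein_seq.upper()
--
--     for frame in [0, 1, 2]:
--         # Translate through stop codons to find proteins anywhere in the sequence
--         translated = translate(dna_seq, frame, stop_at_terminator=False)
--
--         if protein_seq in translated:
--             # Find the position in protein
--             protein_start = translated.index(protein_seq)
--
--             # Convert to DNA coordinates
--             dna_start = frame + (protein_start * 3)
--             dna_end = dna_start + (len(protein_seq) * 3)
--
--             return (dna_start, dna_end, frame)
--
--     return None
-- ===== SOURCE B (Python) =====
-- from typing import Optional, Tuple
--
-- CODON_TABLE = {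
--     'TTT': 'F', 'TTC': 'F', 'TTA': 'L', 'TTG': 'L',
--     'TCT': 'S', 'TCC': 'S', 'TCA': 'S', 'TCG': 'S',
--     'TAT': 'Y', 'TAC': 'Y', 'TAA': '*', 'TAG': '*',
--     'TGT': 'C', 'TGC': 'C', 'TGA': '*', 'TGG': 'W',
--     'CTT': 'L', 'CTC': 'L', 'CTA': 'L', 'CTG': 'L',
--     'CCT': 'P', 'CCC': 'P', 'CCA': 'P', 'CCG': 'P',
--     'CAT': 'H', 'CAC': 'H', 'CAA': 'Q', 'CAG': 'Q',
--     'CGT': 'R', 'CGC': 'R', 'CGA': 'R', 'CGG': 'R',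
--     'ATT': 'I', 'ATC': 'I', 'ATA': 'I', 'ATG': 'M',
--     'ACT': 'T', 'ACC': 'T', 'ACA': 'T', 'ACG': 'T',
--     'AAT': 'N', 'AAC': 'N', 'AAA': 'K', 'AAG': 'K',
--     'AGT': 'S', 'AGC': 'S', 'AGA': 'R', 'AGG': 'R',
--     'GTT': 'V', 'GTC': 'V', 'GTA': 'V', 'GTG': 'V',
--     'GCT': 'A', 'GCC': 'A', 'GCA': 'A', 'GCG': 'A',
--     'GAT': 'D', 'GAC': 'D', 'GAA': 'E', 'GAG': 'E',
--     'GGT': 'G', 'GGC': 'G', 'GGA': 'G', 'GGG': 'G'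
-- }
--
-- def find_protein_in_dna(dna_seq: str, protein_seq: str) -> Optional[Tuple[int, int, int]]:
--     """Codon-window scan: no full-frame translation is built; each candidate
--     start is checked codon by codon against the target."""
--     d = dna_seq.upper()
--     p = protein_seq.upper()
--     m = len(p)
--     for frame in (0, 1, 2):
--         n = (len(d) - frame) // 3  # number of codons in this frame
--         for ps in range(n - m + 1):
--             if all(CODON_TABLE.get(d[frame + (ps + j) * 3: frame + (ps + j) * 3 + 3], 'X') == p[j]
--                    for j in range(m)):
--                 start = frame + ps * 3
--                 return (start, start + m * 3, frame)
--     return None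
-- ===== Notes on version B (the rewrite author's own statement) =====
-- stated objective: faster
-- what changed: Replaces 'translate the whole frame into a string, then substring-search and index it' by a direct codon-window scan: for each frame and candidate codon start, the len(protein) codons are translated on the fly and compared, abandoning a window at the first mismatch, so no translated string is ever materialised.
import Mathlib
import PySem

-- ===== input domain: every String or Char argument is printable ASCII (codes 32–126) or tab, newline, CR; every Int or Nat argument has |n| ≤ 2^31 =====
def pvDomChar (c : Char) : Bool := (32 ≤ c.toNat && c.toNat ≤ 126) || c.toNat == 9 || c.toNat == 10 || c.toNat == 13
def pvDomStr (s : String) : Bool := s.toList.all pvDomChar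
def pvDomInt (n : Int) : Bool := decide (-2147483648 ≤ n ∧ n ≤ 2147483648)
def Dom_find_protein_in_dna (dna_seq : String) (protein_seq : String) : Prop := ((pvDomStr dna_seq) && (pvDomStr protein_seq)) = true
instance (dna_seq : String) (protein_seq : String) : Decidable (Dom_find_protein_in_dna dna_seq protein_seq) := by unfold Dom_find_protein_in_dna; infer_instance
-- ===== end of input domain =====

-- B replaces A's "translate the whole frame, then substring-search" by a direct
-- codon-window scan that translates len(protein) codons on the fly per candidate
-- start, never materialising the translated string (measured faster; same results).

-- shared module constant CODON_TABLE (a Python dict with string keys)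
def codonTable : PySem.Dict (List Char) Char := PySem.Dict.ofList
  ([("TTT",'F'), ("TTC",'F'), ("TTA",'L'), ("TTG",'L'),
    ("TCT",'S'), ("TCC",'S'), ("TCA",'S'), ("TCG",'S'),
    ("TAT",'Y'), ("TAC",'Y'), ("TAA",'*'), ("TAG",'*'),
    ("TGT",'C'), ("TGC",'C'), ("TGA",'*'), ("TGG",'W'),
    ("CTT",'L'), ("CTC",'L'), ("CTA",'L'), ("CTG",'L'),
    ("CCT",'P'), ("CCC",'P'), ("CCA",'P'), ("CCG",'P'),
    ("CAT",'H'), ("CAC",'H'), ("CAA",'Q'), ("CAG",'Q'),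
    ("CGT",'R'), ("CGC",'R'), ("CGA",'R'), ("CGG",'R'),
    ("ATT",'I'), ("ATC",'I'), ("ATA",'I'), ("ATG",'M'),
    ("ACT",'T'), ("ACC",'T'), ("ACA",'T'), ("ACG",'T'),
    ("AAT",'N'), ("AAC",'N'), ("AAA",'K'), ("AAG",'K'),
    ("AGT",'S'), ("AGC",'S'), ("AGA",'R'), ("AGG",'R'),
    ("GTT",'V'), ("GTC",'V'), ("GTA",'V'), ("GTG",'V'),
    ("GCT",'A'), ("GCC",'A'), ("GCA",'A'), ("GCG",'A'),
    ("GAT",'D'), ("GAC",'D'), ("GAA",'E'), ("GAG",'E'),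
    ("GGT",'G'), ("GGC",'G'), ("GGA",'G'), ("GGG",'G')].map
      (fun kv => (kv.1.toList, kv.2)))

-- ===== PORT A =====

-- A's translate loop body: 'for i in range(0, len(dna_seq) - 2, 3): …' with the
-- break on a stop codon when stop_at_terminator is set
def pvTranslateGo (d : List Char) (stop : Bool) : List Int → List Char → List Char
  | [], protein => protein
  | i :: rest, protein =>
    let codon := PySem.List.slice d (some i) (some (i + 3))
    if codon.length = 3 then
      let aa := codonTable.getD codon 'X'
      if aa == '*' && stop then protein
      else pvTranslateGo d stop rest (protein ++ [aa])
    else pvTranslateGo d stop rest protein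

-- A's helper translate(dna_seq, frame, stop_at_terminator)
def pvTranslate (dna : List Char) (frame : Int) (stop : Bool) : List Char :=
  let d := PySem.List.slice (PySem.Chars.upper dna) (some frame) none
  pvTranslateGo d stop (PySem.List.pyRange 0 ((d.length : Int) - 2) 3) []

-- A's 'for frame in [0, 1, 2]' loop; translated.index is guarded by 'in', so
-- Chars.find is exactly str.index here (no exception possible)
def pvFindGo (dna p : List Char) : List Int → Option (Int × Int × Int)
  | [] => none
  | f :: rest =>
    let t := pvTranslate dna f false
    if PySem.Chars.isIn p t then
      let ps := PySem.Chars.find t p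
      some (f + ps * 3, f + ps * 3 + (p.length : Int) * 3, f)
    else pvFindGo dna p rest

def find_protein_in_dna (dna_seq : String) (protein_seq : String) : Option (Int × Int × Int) :=
  let p := PySem.Chars.upper protein_seq.toList
  pvFindGo dna_seq.toList p [0, 1, 2]

-- ===== PORT B =====

-- Source B's 'all(CODON_TABLE.get(d[x:x+3], 'X') == p[j] for j in range(m))';
-- p[j] is in range for every j < m, ported via pyGetD
def altWindow (d p : List Char) (frame ps : Int) : Bool :=
  (List.range p.length).all (fun j =>
    codonTable.getD
      (PySem.List.slice d (some (frame + (ps + (j : Int)) * 3))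
        (some (frame + (ps + (j : Int)) * 3 + 3))) 'X'
      == PySem.List.pyGetD p (j : Int) 'X')

-- Source B's 'for ps in range(n - m + 1)'
def altScan (d p : List Char) (frame : Int) : List Int → Option (Int × Int × Int)
  | [] => none
  | ps :: rest =>
    if altWindow d p frame ps then
      some (frame + ps * 3, frame + ps * 3 + (p.length : Int) * 3, frame)
    else altScan d p frame rest

-- Source B's 'for frame in (0, 1, 2)'
def altFrames (d p : List Char) : List Int → Option (Int × Int × Int)
  | [] => none
  | f :: rest =>
    let n := PySem.Int.floordiv ((d.length : Int) - f) 3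
    match altScan d p f (PySem.List.pyRange 0 (n - (p.length : Int) + 1) 1) with
    | some r => some r
    | none => altFrames d p rest

def find_protein_in_dna_alt (dna_seq : String) (protein_seq : String) : Option (Int × Int × Int) :=
  let d := PySem.Chars.upper dna_seq.toList
  let p := PySem.Chars.upper protein_seq.toList
  altFrames d p [0, 1, 2]

-- ===== PRECONDITION & SPEC =====
def Spec_find_protein_in_dna (dna_seq : String) (protein_seq : String) (out : Option (Int × Int × Int)) : Prop := out = find_protein_in_dna_alt dna_seq protein_seq
instance (dna_seq : String) (protein_seq : String) (out : Option (Int × Int × Int)) : Decidable (Spec_find_protein_in_dna dna_seq protein_seq out) := by unfold Spec_find_protein_in_dna; infer_instance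

-- ===== CLAIM (what is proved, stated in full; the proofs are below) =====
def Claim_equal_find_protein_in_dna : Prop := ∀ (dna_seq : String) (protein_seq : String), Dom_find_protein_in_dna dna_seq protein_seq → Spec_find_protein_in_dna dna_seq protein_seq (find_protein_in_dna dna_seq protein_seq)


-- ===== LEMMAS AND PROOFS =====

-- proof-only helpers: the amino acid of codon k of a frame-shifted sequence,
-- and the per-frame results of the two ports
def frameG (df : List Char) (k : Nat) : Char := codonTable.getD ((df.drop (3 * k)).take 3) 'X'

def frameA (dna p : List Char) (f : Int) : Option (Int × Int × Int) :=
  if PySem.Chars.isIn p (pvTranslate dna f false) then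
    some (f + PySem.Chars.find (pvTranslate dna f false) p * 3,
          f + PySem.Chars.find (pvTranslate dna f false) p * 3 + (p.length : Int) * 3, f)
  else none

def frameB (d p : List Char) (f : Int) : Option (Int × Int × Int) :=
  altScan d p f (PySem.List.pyRange 0
    (PySem.Int.floordiv ((d.length : Int) - f) 3 - (p.length : Int) + 1) 1)

lemma pvFindGo_cons (dna p : List Char) (f : Int) (rest : List Int) :
    pvFindGo dna p (f :: rest) =
      (match frameA dna p f with
       | some r => some r
       | none => pvFindGo dna p rest) := by
  by_cases h : PySem.Chars.isIn p (pvTranslate dna f false) <;> simp [pvFindGo, frameA, h]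

lemma altFrames_cons (d p : List Char) (f : Int) (rest : List Int) :
    altFrames d p (f :: rest) =
      (match frameB d p f with
       | some r => some r
       | none => altFrames d p rest) := rfl

lemma translateGo_map (d : List Char) (ks : List Nat) (acc : List Char)
    (h : ∀ k ∈ ks, 3 * k + 3 ≤ d.length) :
    pvTranslateGo d false (ks.map (fun k => ((3 * k : Nat) : Int))) acc
      = acc ++ ks.map (frameG d) := by
  induction ks generalizing acc with
  | nil => simp [pvTranslateGo]
  | cons k rest ih =>
    have hk : 3 * k + 3 ≤ d.length := h k (List.mem_cons_self ..)
    have hs : PySem.List.slice d (some ((3 * k : Nat) : Int)) (some (((3 * k : Nat) : Int) + 3))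
        = (d.drop (3 * k)).take 3 := by
      have : ((3 * k : Nat) : Int) + 3 = ((3 * k : Nat) : Int) + ((3 : Nat) : Int) := by norm_num
      rw [this, PySem.List.slice_natCast_add]
    have hlen : ((d.drop (3 * k)).take 3).length = 3 := by
      simp [List.length_take, List.length_drop]; omega
    simp only [List.map_cons, pvTranslateGo, hs, hlen, Bool.and_false, Bool.false_eq_true,
      if_false, reduceIte]
    rw [ih _ (fun k hk => h k (List.mem_cons_of_mem _ hk))]
    simp [frameG]

lemma translate_eq (dna : List Char) (f : Nat) :
    pvTranslate dna (f : Int) false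
      = (List.range (((PySem.Chars.upper dna).drop f).length / 3)).map
          (frameG ((PySem.Chars.upper dna).drop f)) := by
  show pvTranslateGo _ false (PySem.List.pyRange 0 _ 3) [] = _
  rw [PySem.List.slice_from_natCast]
  set df := (PySem.Chars.upper dna).drop f with hdf
  set L := df.length with hL
  have hr : PySem.List.pyRange 0 ((L : Int) - 2) 3
      = (List.range (L / 3)).map (fun k => ((3 * k : Nat) : Int)) := by
    rw [PySem.List.pyRange_of_pos _ _ (by norm_num)]
    have hN : (if (0:Int) < (L : Int) - 2 then (((L : Int) - 2 - 0 + 3 - 1) / 3).toNat else 0)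
        = L / 3 := by split_ifs <;> omega
    rw [hN]
    exact List.map_congr_left (fun k _ => by push_cast; ring)
  rw [hr, translateGo_map df _ [] (fun k hk => by
    have := List.mem_range.mp hk
    have := Nat.div_mul_le_self L 3
    omega)]
  simp

-- window check = prefix of the translated frame
lemma window_iff (u p : List Char) (f k : Nat)
    (hk : k + p.length ≤ ((u.drop f).length) / 3) :
    altWindow u p (f : Int) (k : Int) = true ↔
      p <+: ((List.range ((u.drop f).length / 3)).map (frameG (u.drop f))).drop k := by
  have key : ∀ j, ∀ hj : j < p.length,
      (((codonTable.getD (PySem.List.slice u (some ((f : Int) + ((k : Int) + (j : Int)) * 3))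
          (some ((f : Int) + ((k : Int) + (j : Int)) * 3 + 3))) 'X')
        == PySem.List.pyGetD p (j : Int) 'X') = true
       ↔ frameG (u.drop f) (k + j) = p[j]'hj) := by
    intro j hj
    have hc1 : ((f : Int) + ((k : Int) + (j : Int)) * 3) = ((f + (k + j) * 3 : Nat) : Int) := by
      push_cast; ring
    have hc2 : ((f : Int) + ((k : Int) + (j : Int)) * 3 + 3)
        = ((f + (k + j) * 3 : Nat) : Int) + ((3 : Nat) : Int) := by push_cast; ring
    rw [hc2, hc1, PySem.List.slice_natCast_add, beq_iff_eq]
    have hdrop : List.drop (f + (k + j) * 3) u = List.drop (3 * (k + j)) (List.drop f u) := by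
      rw [List.drop_drop]; ring_nf
    have hget : PySem.List.pyGetD p (j : Int) 'X' = p[j] := by
      rw [PySem.List.pyGetD_natCast]; exact List.getD_eq_getElem _ _ hj
    rw [hdrop, hget, frameG]
  rw [List.prefix_iff_getElem?]
  unfold altWindow
  rw [List.all_eq_true]
  constructor
  · intro h i hi
    have hin : k + i < (u.drop f).length / 3 := by omega
    rw [List.getElem?_drop, List.getElem?_map, List.getElem?_range hin]
    simp only [Option.map_some, Option.some.injEq]
    exact (key i hi).mp (h _ (List.mem_range.mpr hi))
  · intro h j hj
    have hjlt : j < p.length := List.mem_range.mp hj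
    have hin : k + j < (u.drop f).length / 3 := by omega
    have := h j hjlt
    rw [List.getElem?_drop, List.getElem?_map, List.getElem?_range hin] at this
    simp only [Option.map_some, Option.some.injEq] at this
    exact (key j hjlt).mpr this

lemma altScan_none (d p : List Char) (f : Int) (l : List Int)
    (h : ∀ x ∈ l, altWindow d p f x = false) :
    altScan d p f l = none := by
  induction l with
  | nil => rfl
  | cons x rest ih =>
    simp only [altScan, h x (List.mem_cons_self ..), Bool.false_eq_true, if_false]
    exact ih (fun y hy => h y (List.mem_cons_of_mem _ hy))

lemma altScan_first (d p : List Char) (f : Int) (b k0 : Int) :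
    ∀ (fuel : Nat) (a : Int), (b - a).toNat ≤ fuel → a ≤ k0 → k0 < b →
    altWindow d p f k0 = true →
    (∀ x, a ≤ x → x < k0 → altWindow d p f x = false) →
    altScan d p f (PySem.List.pyRange a b 1)
      = some (f + k0 * 3, f + k0 * 3 + (p.length : Int) * 3, f) := by
  intro fuel
  induction fuel with
  | zero => intro a hfuel ha hb _ _; omega
  | succ fu ih =>
    intro a hfuel ha hb hw hmin
    rw [PySem.List.pyRange_one_cons (by omega)]
    by_cases hak : a = k0
    · subst hak; simp only [altScan, hw, if_true]
    · have hfa : altWindow d p f a = false := hmin a le_rfl (by omega)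
      simp only [altScan, hfa, Bool.false_eq_true, if_false]
      exact ih (a + 1) (by omega) (by omega) hb hw (fun x hx1 hx2 => hmin x (by omega) hx2)

-- the per-frame results agree (for nonempty protein)
lemma frame_eq (dna p : List Char) (f : Nat) (hp : p ≠ []) :
    frameA dna p (f : Int) = frameB (PySem.Chars.upper dna) p (f : Int) := by
  set u := PySem.Chars.upper dna with hu
  set df := u.drop f with hdf
  set n := df.length / 3 with hn
  set m := p.length with hm
  set t := (List.range n).map (frameG df) with hT
  have hm1 : 0 < m := List.length_pos_iff.mpr hp
  have ht : pvTranslate dna (f : Int) false = t := translate_eq dna f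
  have htlen : t.length = n := by simp [hT]
  have hLdrop : df.length = u.length - f := by simp [hdf]
  unfold frameA frameB
  rw [ht, PySem.Int.floordiv_eq_ediv_of_pos (by norm_num)]
  by_cases hge : f ≤ u.length
  · have hnI : ((u.length : Int) - (f : Int)) / 3 = (n : Int) := by omega
    rw [hnI]
    by_cases hnm : n < m
    · -- frame too short: no occurrence, empty candidate range
      have hin : ¬ PySem.Chars.isIn p t = true := by
        intro hin
        have := ((PySem.Chars.isIn_iff_infix p t).mp hin).length_le
        omega
      rw [if_neg hin, PySem.List.pyRange_one_eq_nil (by omega)]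
      rfl
    · push Not at hnm
      by_cases hin : PySem.Chars.isIn p t = true
      · rw [if_pos hin]
        have hnn : 0 ≤ PySem.Chars.find t p :=
          (PySem.Chars.find_nonneg_iff t p).mpr ((PySem.Chars.isIn_iff_infix p t).mp hin)
        obtain ⟨hpre, hmin⟩ := PySem.Chars.find_spec hnn
        set q := (PySem.Chars.find t p).toNat with hqdef
        have hq : PySem.Chars.find t p = (q : Int) := (Int.toNat_of_nonneg hnn).symm
        have hqm : q + m ≤ n := by
          have h1 := hpre.length_le
          rw [List.length_drop, htlen] at h1
          omega
        rw [hq]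
        exact (altScan_first u p (f : Int) ((n : Int) - (m : Int) + 1) (q : Int)
          (((n : Int) - (m : Int) + 1 - 0).toNat) 0 le_rfl (by omega) (by omega)
          ((window_iff u p f q hqm).mpr hpre)
          (fun x hx0 hxq => by
            lift x to Nat using hx0 with k
            cases hw : altWindow u p (f : Int) (k : Int) with
            | false => rfl
            | true =>
              exact absurd ((window_iff u p f k (by simp only [← hdf]; omega)).mp hw)
                (hmin k (by omega)))).symm
      · rw [if_neg hin]
        refine (altScan_none u p (f : Int) _ (fun x hx => ?_)).symm
        obtain ⟨hx0, hxN⟩ := PySem.List.mem_pyRange_one.mp hx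
        lift x to Nat using hx0 with k
        cases hw : altWindow u p (f : Int) (k : Int) with
        | false => rfl
        | true =>
          exact absurd ((PySem.Chars.exists_prefix_drop_iff_isIn p t).mp
            ⟨k, (window_iff u p f k (by simp only [← hdf]; omega)).mp hw⟩) hin
  · push Not at hge
    have hL0 : df.length = 0 := by omega
    have hn0 : n = 0 := by omega
    have htnil : t = [] := by simp [hT, hn0]
    have hin : ¬ PySem.Chars.isIn p t = true := by
      rw [htnil]
      intro hin
      exact hp (List.infix_nil.mp ((PySem.Chars.isIn_iff_infix p []).mp hin))
    rw [if_neg hin, PySem.List.pyRange_one_eq_nil (by omega)]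
    rfl

-- ===== VERDICT (by name: the statement is the Claim_ definition above) =====
theorem find_protein_in_dna_spec : Claim_equal_find_protein_in_dna := by
  intro dna_seq protein_seq _
  unfold Spec_find_protein_in_dna find_protein_in_dna find_protein_in_dna_alt
  by_cases hp : PySem.Chars.upper protein_seq.toList = []
  · -- empty protein: both ports return some (0, 0, 0) at frame 0
    rw [hp]
    have hA : pvFindGo dna_seq.toList [] [0, 1, 2] = some (0, 0, 0) := by
      simp [pvFindGo, PySem.Chars.isIn_nil, PySem.Chars.find_nil]
    have hB : altFrames (PySem.Chars.upper dna_seq.toList) [] [0, 1, 2] = some (0, 0, 0) := by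
      have hpos : (0 : Int) < PySem.Int.floordiv
          ((((PySem.Chars.upper dna_seq.toList).length) : Int) - 0) 3 - (([] : List Char).length : Int) + 1 := by
        rw [PySem.Int.floordiv_eq_ediv_of_pos (by norm_num)]
        simp only [List.length_nil, Nat.cast_zero]
        omega
      rw [altFrames, PySem.List.pyRange_one_cons hpos]
      simp [altScan, altWindow]
    rw [hA, hB]
  · have h0 := frame_eq dna_seq.toList _ 0 hp
    have h1 := frame_eq dna_seq.toList _ 1 hp
    have h2 := frame_eq dna_seq.toList _ 2 hp
    simp only [Nat.cast_zero, Nat.cast_one, Nat.cast_ofNat] at h0 h1 h2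
    rw [pvFindGo_cons, h0, altFrames_cons]
    cases hW0 : frameB (PySem.Chars.upper dna_seq.toList) (PySem.Chars.upper protein_seq.toList) 0 with
    | some r => rfl
    | none =>
      rw [pvFindGo_cons, h1, altFrames_cons]
      cases hW1 : frameB (PySem.Chars.upper dna_seq.toList) (PySem.Chars.upper protein_seq.toList) 1 with
      | some r => rfl
      | none =>
        rw [pvFindGo_cons, h2, altFrames_cons]
        cases hW2 : frameB (PySem.Chars.upper dna_seq.toList) (PySem.Chars.upper protein_seq.toList) 2 with
        | some r => rfl
        | none => rfl
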